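-- pv_equiv track=rewrite | github.com/JoanWu5/leetcode-lintcode-python | basic questions/25. Print X.py | printX
-- ===== SOURCE A (Python) =====
-- def printX(n: int):
--     # write your code here
--     result = []
--     for i in range(n):
--         line_i = ""
--         for j in range(n):
--             if j == i or j == n - i - 1:
--                line_i += "X"
--             else:
--                 line_i += " "
--         result.append(line_i)
--     return result
-- ===== SOURCE B (Python) =====
-- def printX(n: int):
--     result = []
--     for i in range(n):
--         buffer = [" "] * n
--         buffer[i] = "X"
--         buffer[n - i - 1] = "X"
--         result.append("".join(buffer))
--     return result
-- ===== Notes on version B (the rewrite author's own statement) =====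
-- stated objective: simpler
-- what changed: B drops the inner per-cell loop and its branch: each row is a buffer of n spaces with 'X' assigned directly at the two diagonal positions, then joined.
import Mathlib
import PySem

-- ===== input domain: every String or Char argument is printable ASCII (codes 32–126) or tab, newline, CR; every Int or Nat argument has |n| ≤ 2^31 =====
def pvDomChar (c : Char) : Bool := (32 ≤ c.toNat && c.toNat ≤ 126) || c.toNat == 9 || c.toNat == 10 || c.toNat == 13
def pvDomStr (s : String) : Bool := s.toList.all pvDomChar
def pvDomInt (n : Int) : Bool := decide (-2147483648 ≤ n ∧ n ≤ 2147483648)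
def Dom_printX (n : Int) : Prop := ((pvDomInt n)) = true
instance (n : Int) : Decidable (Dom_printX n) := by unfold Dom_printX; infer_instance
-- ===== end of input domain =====

-- B replaces the inner per-cell loop and branch by direct assignment of the two 'X's into a row buffer of spaces (objective: simpler).

-- ===== PORT A =====
def printX (n : Int) : List String :=
  (PySem.List.pyRange 0 n 1).foldl (fun result i =>
    let line_i := (PySem.List.pyRange 0 n 1).foldl (fun acc j =>
      acc ++ [if j = i ∨ j = n - i - 1 then 'X' else ' ']) ([] : List Char)
    result ++ [String.ofList line_i]) []

-- ===== PORT B =====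
def printX_alt (n : Int) : List String :=
  (PySem.List.pyRange 0 n 1).map (fun i =>
    let buffer := List.replicate n.toNat ' '
    let buffer := PySem.List.pySetD buffer i 'X'
    let buffer := PySem.List.pySetD buffer (n - i - 1) 'X'
    String.ofList buffer)

-- ===== PRECONDITION & SPEC =====
def Spec_printX (n : Int) (out : List String) : Prop := out = printX_alt n
instance (n : Int) (out : List String) : Decidable (Spec_printX n out) := by unfold Spec_printX; infer_instance

-- ===== CLAIM (what is proved, stated in full; the proofs are below) =====
def Claim_equal_printX : Prop := ∀ (n : Int), Dom_printX n → Spec_printX n (printX n)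

-- ===== LEMMAS AND PROOFS =====

-- appending one element per step is a map
theorem foldl_append_singleton {α β : Type} (f : α → β) (l : List α) (init : List β) :
    l.foldl (fun acc x => acc ++ [f x]) init = init ++ l.map f := by
  induction l generalizing init with
  | nil => simp
  | cons x xs ih => simp [List.foldl, ih]

-- the row built cell by cell equals the buffer with the two 'X's placed
theorem row_eq (n i : Int) (hi0 : 0 ≤ i) (hin : i < n) :
    (PySem.List.pyRange 0 n 1).map (fun j => if j = i ∨ j = n - i - 1 then 'X' else ' ')
      = PySem.List.pySetD (PySem.List.pySetD (List.replicate n.toNat ' ') i 'X') (n - i - 1) 'X' := by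
  rw [PySem.List.pySetD_of_nonneg (i := n - i - 1) _ 'X' (by omega),
      PySem.List.pySetD_of_nonneg (i := i) _ 'X' hi0, PySem.List.pyRange_one]
  apply List.ext_getElem
  · simp
  · intro k h1 h2
    simp only [List.getElem_map, List.getElem_range, List.getElem_set, List.getElem_replicate]
    simp only [List.length_map, List.length_range] at h1
    have hk : (k : Int) < n := by omega
    have hA' : (i.toNat = k) = ((k : Int) = i) := by
      apply propext; constructor <;> intro h <;> omega
    have hB' : ((n - i - 1).toNat = k) = ((k : Int) = n - i - 1) := by
      apply propext; constructor <;> intro h <;> omega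
    simp only [hA', hB', zero_add]
    by_cases hA : (k : Int) = i <;> by_cases hB : (k : Int) = n - i - 1 <;>
      simp [hA, hB]

-- ===== VERDICT (by name: the statement is the Claim_ definition above) =====
theorem printX_spec : Claim_equal_printX := by
  intro n _
  unfold Spec_printX printX printX_alt
  rw [foldl_append_singleton (fun i =>
        String.ofList ((PySem.List.pyRange 0 n 1).foldl (fun acc j =>
          acc ++ [if j = i ∨ j = n - i - 1 then 'X' else ' ']) [])), List.nil_append]
  apply List.map_congr_left
  intro i hi
  rw [PySem.List.mem_pyRange_one] at hi
  rw [foldl_append_singleton, List.nil_append, row_eq n i hi.1 hi.2]
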